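-- pv_equiv track=rewrite | github.com/root-zw/nl2sql | server/frontend_static.py | should_skip_frontend
-- ===== SOURCE A (Python) =====
-- RESERVED_FRONTEND_PREFIXES = ("api", "docs", "redoc", "openapi.json")
--
-- def should_skip_frontend(path: str) -> bool:
--     """保留后端专用路径，避免被 SPA 回退吞掉。"""
--     normalized = path.strip("/")
--     if not normalized:
--         return False
--
--     return any(
--         normalized == prefix or normalized.startswith(f"{prefix}/")
--         for prefix in RESERVED_FRONTEND_PREFIXES
--     )
-- ===== SOURCE B (Python) =====
-- RESERVED_FRONTEND_PREFIXES = ("api", "docs", "redoc", "openapi.json")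
--
--
-- def _build_trie(words):
--     root = {}
--     for w in words:
--         node = root
--         for ch in w:
--             node = node.setdefault(ch, {})
--         node[""] = True  # terminal marker
--     return root
--
--
-- _TRIE = _build_trie(RESERVED_FRONTEND_PREFIXES)
--
--
-- def should_skip_frontend(path: str) -> bool:
--     """保留后端专用路径，避免被 SPA 回退吞掉。"""
--     normalized = path.strip("/")
--     if not normalized:
--         return False
--     node = _TRIE
--     for ch in normalized:
--         if ch == "/":
--             break
--         if ch not in node:
--             return False
--         node = node[ch]
--     return "" in node
-- ===== Notes on version B (the rewrite author's own statement) =====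
-- stated objective: alternative
-- what changed: B matches the leading path segment against a character trie precomputed from the reserved prefixes, scanning the normalized path left to right once (break at '/', fail on a missing edge, accept on a terminal node), instead of A's any() loop doing an equality and a startswith comparison per prefix.
import Mathlib
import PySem

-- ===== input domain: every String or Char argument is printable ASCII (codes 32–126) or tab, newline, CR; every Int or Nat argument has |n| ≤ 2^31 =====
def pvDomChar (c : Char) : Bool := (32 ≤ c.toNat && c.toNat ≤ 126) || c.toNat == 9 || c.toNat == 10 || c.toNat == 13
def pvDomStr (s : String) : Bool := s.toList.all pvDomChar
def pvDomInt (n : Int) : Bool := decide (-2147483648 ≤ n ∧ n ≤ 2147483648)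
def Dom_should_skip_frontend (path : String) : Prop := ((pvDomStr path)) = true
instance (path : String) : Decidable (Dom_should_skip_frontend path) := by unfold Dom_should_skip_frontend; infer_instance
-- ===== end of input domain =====

-- B matches the leading path segment with a character trie built once from the reserved
-- prefixes, scanning the normalized path in a single pass, instead of A's any() loop of
-- per-prefix equality/startswith tests (alternative algorithm, same observable behaviour).

def pvReserved : List String := ["api", "docs", "redoc", "openapi.json"]

-- ===== PORT A =====
def should_skip_frontend (path : String) : Bool :=
  let normalized := PySem.Str.stripChars path "/"
  if normalized == "" then false
  else
    pvReserved.any (fun pfx =>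
      normalized == pfx || PySem.Str.startswith normalized (pfx ++ "/"))

-- ===== PORT B =====
-- Python B's trie is a dict of dicts with a "" key as terminal marker; ported by hand
-- (PySem has no recursive dict) as a mutual inductive: terminal Bool = the "" key,
-- children kept in insertion order like a Python dict.  Exact on all inputs.
mutual
inductive PvTrie where
  | mk : Bool → PvChildren → PvTrie
  deriving DecidableEq, Repr
inductive PvChildren where
  | nil : PvChildren
  | cons : Char → PvTrie → PvChildren → PvChildren
  deriving DecidableEq, Repr
end

def pvEmptyTrie : PvTrie := .mk false .nil

-- dict lookup: node[ch] / ch in node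
def pvChildGet : PvChildren → Char → Option PvTrie
  | .nil, _ => none
  | .cons c' t ch, c => if c' = c then some t else pvChildGet ch c

-- inner loop of _build_trie: node.setdefault(ch, {}) chain, then node[""] = True
mutual
def pvInsert : PvTrie → List Char → PvTrie
  | .mk _ ch, [] => .mk true ch
  | .mk term ch, c :: rest => .mk term (pvChildInsert ch c rest)
def pvChildInsert : PvChildren → Char → List Char → PvChildren
  | .nil, c, rest => .cons c (pvInsert pvEmptyTrie rest) .nil
  | .cons c' t ch, c, rest =>
      if c' = c then .cons c' (pvInsert t rest) ch
      else .cons c' t (pvChildInsert ch c rest)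
end

-- _build_trie: outer loop over the words
def pvBuildTrie (words : List String) : PvTrie :=
  words.foldl (fun t w => pvInsert t w.toList) pvEmptyTrie

def pvTRIE : PvTrie := pvBuildTrie pvReserved

-- the for-ch loop of B: break at '/', return False on a missing edge, then '"" in node'
def pvWalk : PvTrie → List Char → Bool
  | .mk term _, [] => term
  | .mk term ch, c :: rest =>
      if c = '/' then term
      else
        match pvChildGet ch c with
        | none => false
        | some t' => pvWalk t' rest

def should_skip_frontend_alt (path : String) : Bool :=
  let normalized := PySem.Str.stripChars path "/"
  if normalized == "" then false
  else pvWalk pvTRIE normalized.toList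

-- ===== PRECONDITION & SPEC =====
def Spec_should_skip_frontend (path : String) (out : Bool) : Prop := out = should_skip_frontend_alt path
instance (path : String) (out : Bool) : Decidable (Spec_should_skip_frontend path out) := by unfold Spec_should_skip_frontend; infer_instance

-- ===== CLAIM (what is proved, stated in full; the proofs are below) =====
def Claim_equal_should_skip_frontend : Prop := ∀ (path : String), Dom_should_skip_frontend path → Spec_should_skip_frontend path (should_skip_frontend path)

-- ===== LEMMAS AND PROOFS =====

-- straight trie walk (no '/' handling), for reasoning
def pvWalkS : PvTrie → List Char → Bool
  | .mk term _, [] => term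
  | .mk _ ch, c :: rest =>
      match pvChildGet ch c with
      | none => false
      | some t' => pvWalkS t' rest

theorem pv_walk_eq_walkS (l : List Char) : ∀ t, pvWalk t l = pvWalkS t (l.takeWhile (· != '/')) := by
  induction l with
  | nil => intro t; cases t; rfl
  | cons c rest ih =>
    intro t
    cases t with
    | mk term ch =>
      by_cases hc : c = '/'
      · simp [pvWalk, hc, pvWalkS]
      · have hb : (c != '/') = true := by simp [hc]
        simp only [pvWalk, hc, if_false, List.takeWhile_cons, hb, if_true, pvWalkS]
        cases pvChildGet ch c with
        | none => rfl
        | some t' => exact ih t'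

theorem pv_walkS_empty (s : List Char) : pvWalkS pvEmptyTrie s = false := by
  cases s <;> rfl

theorem pv_childGet_insert : ∀ (ch : PvChildren) (c : Char) (rest : List Char) (d : Char),
    pvChildGet (pvChildInsert ch c rest) d =
      if c = d then some (pvInsert ((pvChildGet ch c).getD pvEmptyTrie) rest)
      else pvChildGet ch d
  | .nil, c, rest, d => by
      by_cases h : c = d <;> simp [pvChildInsert, pvChildGet, h]
  | .cons c' t ch', c, rest, d => by
      by_cases h1 : c' = c
      · subst h1
        by_cases h2 : c' = d <;> simp [pvChildInsert, pvChildGet, h2]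
      · by_cases h2 : c' = d
        · subst h2
          have hne : c ≠ c' := fun he => h1 (Eq.symm he)
          simp [pvChildInsert, h1, pvChildGet, hne]
        · simp [pvChildInsert, h1, pvChildGet, h2, pv_childGet_insert ch' c rest d]

theorem pv_walkS_insert (w : List Char) : ∀ (t : PvTrie) (s : List Char),
    pvWalkS (pvInsert t w) s = ((s == w) || pvWalkS t s) := by
  induction w with
  | nil =>
    intro t s
    cases t with
    | mk term ch =>
      cases s with
      | nil => simp [pvInsert, pvWalkS]
      | cons d r =>
        simp only [pvInsert, pvWalkS]
        cases pvChildGet ch d <;> simp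
  | cons c rest ih =>
    intro t s
    cases t with
    | mk term ch =>
      cases s with
      | nil => simp [pvInsert, pvWalkS]
      | cons d r =>
        simp only [pvInsert, pvWalkS, pv_childGet_insert]
        by_cases h : c = d
        · subst h
          cases hg : pvChildGet ch c with
          | none =>
            simp [ih, pv_walkS_empty]
          | some t' =>
            simp [ih]
        · have hdc : d ≠ c := fun he => h (Eq.symm he)
          have h2 : (d == c) = false := by simp [hdc]
          simp only [h, if_false, List.cons_beq_cons, h2, Bool.false_and]
          cases pvChildGet ch d <;> simp

theorem pv_walkS_fold (ws : List String) : ∀ (t : PvTrie) (s : List Char),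
    pvWalkS (ws.foldl (fun t w => pvInsert t w.toList) t) s =
      (ws.any (fun w => s == w.toList) || pvWalkS t s) := by
  induction ws with
  | nil => intro t s; simp
  | cons w ws ih =>
    intro t s
    simp only [List.foldl_cons, List.any_cons, ih, pv_walkS_insert, Bool.or_assoc,
      Bool.or_comm (s == w.toList)]

theorem pv_walkS_trie (s : List Char) :
    pvWalkS pvTRIE s = pvReserved.any (fun w => s == w.toList) := by
  rw [pvTRIE, pvBuildTrie, pv_walkS_fold, pv_walkS_empty, Bool.or_false]

-- A's per-prefix test, for a prefix without '/', equals "first segment = prefix"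
theorem pv_one (p : List Char) (hp : '/' ∉ p) (n : List Char) :
    ((n == p) || (p ++ ['/']).isPrefixOf n) = (n.takeWhile (· != '/') == p) := by
  induction p generalizing n with
  | nil =>
    cases n with
    | nil => rfl
    | cons c t =>
      by_cases hc : c = '/'
      · simp [List.isPrefixOf, hc]
      · have h1 : ('/' == c) = false := by simp [Ne.symm hc]
        simp [List.isPrefixOf, hc, h1]
  | cons a q ih =>
    have ha : a ≠ '/' := by intro h; exact hp (h ▸ List.mem_cons_self)
    have hq : '/' ∉ q := fun h => hp (List.mem_cons_of_mem _ h)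
    cases n with
    | nil => simp [List.takeWhile]
    | cons c t =>
      by_cases hc : c = '/'
      · subst hc
        have hca : '/' ≠ a := Ne.symm ha
        simp [List.isPrefixOf, hca, ha]
      · by_cases hca : c = a
        · subst hca
          simp [hc, ← ih hq t]
        · have h1 : (c == a) = false := by simp [hca]
          have h2 : (a == c) = false := by simp [Ne.symm hca]
          simp [List.isPrefixOf, hc, h1, h2]

theorem pv_str_beq (n p : String) : (n == p) = (n.toList == p.toList) := by
  by_cases h : n = p
  · subst h; simp
  · have : n.toList ≠ p.toList := fun he => h (by
      have := congrArg String.ofList he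
      simpa [String.ofList_toList] using this)
    simp [h, this]

-- A's per-prefix test at String level
theorem pv_oneS (p : String) (hp : '/' ∉ p.toList) (n : String) :
    ((n == p) || PySem.Str.startswith n (p ++ "/")) =
      (n.toList.takeWhile (· != '/') == p.toList) := by
  rw [pv_str_beq n p, PySem.Str.startswith_eq]
  have hsl : (p ++ "/").toList = p.toList ++ ['/'] := by simp
  rw [hsl, ← pv_one p.toList hp n.toList]
  simp [PySem.Chars.startswith]

-- A's any() equals the trie walk on any normalized string
theorem pv_core (n : String) :
    (pvReserved.any (fun pfx => n == pfx || PySem.Str.startswith n (pfx ++ "/"))) =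
    pvWalk pvTRIE n.toList := by
  rw [pv_walk_eq_walkS, pv_walkS_trie]
  simp only [pvReserved, List.any_cons, List.any_nil, Bool.or_false]
  rw [pv_oneS "api" (by decide) n, pv_oneS "docs" (by decide) n,
      pv_oneS "redoc" (by decide) n, pv_oneS "openapi.json" (by decide) n]

-- ===== VERDICT (by name: the statement is the Claim_ definition above) =====
theorem should_skip_frontend_spec : Claim_equal_should_skip_frontend := by
  intro path _
  unfold Spec_should_skip_frontend should_skip_frontend should_skip_frontend_alt
  set n := PySem.Str.stripChars path "/" with hn
  by_cases h : n = ""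
  · simp [h]
  · have hb : (n == "") = false := by simpa using h
    simp only [hb, Bool.false_eq_true, if_false]
    exact pv_core n
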